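-- pv_equiv track=rewrite | github.com/Mangan-Group/GraphGA | main.py | first_seen
-- ===== SOURCE A (Python) =====
-- def first_seen(progression):
--
--     looking = True
--     gen_num = 0
--
--     for gen in reversed(progression):
--         if progression[-1] != gen:
--             return len(progression) - gen_num
--         gen_num += 1
--
--     return 0
-- ===== SOURCE B (Python) =====
-- def first_seen(progression):
--     start = 0
--     for i in range(1, len(progression)):
--         if progression[i] != progression[i - 1]:
--             start = i
--     return start
-- ===== Notes on version B (the rewrite author's own statement) =====
-- stated objective: alternative
-- what changed: Replaces A's reverse scan comparing each element to the last element (returning len - count on first mismatch) with a single forward pass that records the start index of the current run of equal adjacent elements.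
import Mathlib
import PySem

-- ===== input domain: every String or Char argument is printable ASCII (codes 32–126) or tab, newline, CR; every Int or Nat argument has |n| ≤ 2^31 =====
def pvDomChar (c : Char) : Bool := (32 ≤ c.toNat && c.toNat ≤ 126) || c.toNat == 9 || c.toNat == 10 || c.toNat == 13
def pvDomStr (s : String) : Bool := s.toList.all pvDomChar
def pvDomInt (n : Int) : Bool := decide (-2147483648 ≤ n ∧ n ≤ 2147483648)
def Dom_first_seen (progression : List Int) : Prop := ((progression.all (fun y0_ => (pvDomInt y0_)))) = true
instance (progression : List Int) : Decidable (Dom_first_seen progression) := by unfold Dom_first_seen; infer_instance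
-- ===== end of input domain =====

-- B replaces A's backwards scan with a forward pass recording the start of the current
-- run of equal adjacent elements (alternative decomposition; same asymptotic cost).

-- ===== PORT A =====
-- the 'for gen in reversed(progression)' loop with early return; gen_num is the accumulator
def firstSeenLoopA (progression : List Int) : List Int → Int → Int
  | [], _ => 0
  | gen :: rest, gen_num =>
    if PySem.List.pyGet? progression (-1) ≠ some gen then
      (progression.length : Int) - gen_num
    else
      firstSeenLoopA progression rest (gen_num + 1)

def first_seen (progression : List Int) : Int :=
  firstSeenLoopA progression progression.reverse 0

-- ===== PORT B =====
def first_seen_alt (progression : List Int) : Int :=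
  (PySem.List.pyRange 1 (progression.length : Int) 1).foldl
    (fun start i =>
      if PySem.List.pyGet? progression i ≠ PySem.List.pyGet? progression (i - 1) then i
      else start)
    0

-- ===== PRECONDITION & SPEC =====
def Spec_first_seen (progression : List Int) (out : Int) : Prop := out = first_seen_alt progression
instance (progression : List Int) (out : Int) : Decidable (Spec_first_seen progression out) := by unfold Spec_first_seen; infer_instance

-- ===== CLAIM (what is proved, stated in full; the proofs are below) =====
def Claim_equal_first_seen : Prop := ∀ (progression : List Int), Dom_first_seen progression → Spec_first_seen progression (first_seen progression)

-- ===== LEMMAS AND PROOFS =====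

-- length of the final constant run (counted on the reversed list)
def trailRun (p : List Int) : Nat :=
  match p.reverse with
  | [] => 0
  | a :: r => (r.takeWhile (fun x => x == a)).length + 1

lemma loopA_eq (p : List Int) (a : Int) (h : PySem.List.pyGet? p (-1) = some a)
    (l : List Int) (k : Int) :
    firstSeenLoopA p l k =
      if l.all (fun x => x == a) then 0
      else (p.length : Int) - (k + ((l.takeWhile (fun x => x == a)).length : Int)) := by
  induction l generalizing k with
  | nil => simp [firstSeenLoopA]
  | cons gen rest ih =>
    by_cases hg : gen = a
    · subst hg
      simp only [firstSeenLoopA, h, ne_eq, not_true_eq_false, if_false,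
        ih (k + 1), List.all_cons, List.takeWhile_cons, beq_self_eq_true, if_true,
        List.length_cons, Bool.true_and]
      split_ifs with hall
      · rfl
      · push_cast; ring
    · simp only [firstSeenLoopA, h, ne_eq, Option.some.injEq]
      rw [if_pos (by exact fun he => hg he.symm)]
      have : (gen == a) = false := by simp [hg]
      simp [List.all_cons, this]

lemma first_seen_eq_trail (p : List Int) :
    first_seen p = (p.length : Int) - (trailRun p : Nat) := by
  rcases hp : p.reverse with _ | ⟨a, r⟩
  · have : p = [] := by simpa using congrArg List.reverse hp
    subst this; simp [first_seen, firstSeenLoopA, trailRun]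
  · have hlast : PySem.List.pyGet? p (-1) = some a := by
      rw [PySem.List.pyGet?_neg_one, ← List.head?_reverse, hp]; rfl
    have hlen : p.length = r.length + 1 := by
      have := congrArg List.length hp; simpa using this
    unfold first_seen
    rw [hp]
    rw [loopA_eq p a hlast (a :: r) 0]
    unfold trailRun
    rw [hp]
    simp only [List.all_cons, beq_self_eq_true, Bool.true_and, List.takeWhile_cons,
      if_true, List.length_cons]
    split_ifs with hall
    · have hself : r.takeWhile (fun x => x == a) = r := by
        rw [List.takeWhile_eq_self_iff]
        intro x hx; exact List.all_eq_true.mp hall x hx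
      rw [hself, hlen]; push_cast; ring
    · push_cast; ring

lemma pyGet_append_left (q : List Int) (a : Int) (i : Nat) (hi : i < q.length) :
    PySem.List.pyGet? (q ++ [a]) (i : Int) = PySem.List.pyGet? q (i : Int) := by
  rw [PySem.List.pyGet?_natCast, PySem.List.pyGet?_natCast,
    List.getElem?_append_left hi]

lemma first_seen_alt_eq_trail (p : List Int) :
    first_seen_alt p = (p.length : Int) - (trailRun p : Nat) := by
  induction p using List.reverseRecOn with
  | nil =>
    simp [first_seen_alt, trailRun,
      PySem.List.pyRange_one_eq_nil (a := 1) (b := 0) (by norm_num)]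
  | append_singleton q a ih =>
    rcases hq : q.reverse with _ | ⟨b, r'⟩
    · have hq0 : q = [] := by simpa using congrArg List.reverse hq
      subst hq0
      simp [first_seen_alt, trailRun,
        PySem.List.pyRange_one_eq_nil (a := 1) (b := 1) (by norm_num)]
    · have hqne : q ≠ [] := by
        intro h; rw [h] at hq; simp at hq
      have hqlen : 1 ≤ q.length := List.length_pos_iff.mpr hqne
      have hlenp : ((q ++ [a]).length : Int) = (q.length : Int) + 1 := by
        simp
      have hsplit : PySem.List.pyRange 1 ((q ++ [a]).length : Int) 1 =
          PySem.List.pyRange 1 (q.length : Int) 1 ++ [(q.length : Int)] := by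
        rw [hlenp]
        exact PySem.List.pyRange_one_succ_right (by exact_mod_cast hqlen)
      unfold first_seen_alt
      rw [hsplit, List.foldl_append]
      have hinner :
          (PySem.List.pyRange 1 (q.length : Int) 1).foldl
            (fun start i =>
              if PySem.List.pyGet? (q ++ [a]) i ≠ PySem.List.pyGet? (q ++ [a]) (i - 1) then i
              else start) 0 = first_seen_alt q := by
        unfold first_seen_alt
        apply PySem.List.foldl_congr_mem
        intro acc i hi
        have hib := (PySem.List.mem_pyRange_one).1 hi
        have h1 : PySem.List.pyGet? (q ++ [a]) i = PySem.List.pyGet? q i := by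
          have : i = ((i.toNat : Nat) : Int) := by omega
          rw [this]; exact pyGet_append_left q a i.toNat (by omega)
        have h2 : PySem.List.pyGet? (q ++ [a]) (i - 1) = PySem.List.pyGet? q (i - 1) := by
          have : i - 1 = (((i - 1).toNat : Nat) : Int) := by omega
          rw [this]; exact pyGet_append_left q a (i - 1).toNat (by omega)
        rw [h1, h2]
      rw [hinner, ih]
      -- final iteration: index q.length
      have hgetA : PySem.List.pyGet? (q ++ [a]) (q.length : Int) = some a :=
        PySem.List.pyGet?_append_length (pre := q) (y := a) (ys := ([] : List Int))
      have hgetB : PySem.List.pyGet? (q ++ [a]) ((q.length : Int) - 1) = some b := by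
        have h1 : ((q.length : Int) - 1) = ((q.length - 1 : Nat) : Int) := by omega
        rw [h1, pyGet_append_left q a (q.length - 1) (by omega)]
        rw [PySem.List.pyGet?_natCast]
        rw [← List.getLast?_eq_getElem?]
        rw [← List.head?_reverse, hq]
        rfl
      have htrailp : trailRun (q ++ [a]) =
          (if b == a then trailRun q + 1 else 1) := by
        unfold trailRun
        rw [List.reverse_append]
        simp only [List.reverse_cons, List.reverse_nil, List.nil_append, List.cons_append,
          hq, List.takeWhile_cons]
        by_cases hba : b = a
        · subst hba
          simp
        · have hf : (b == a) = false := by simp [hba]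
          simp [hf]
      simp only [List.foldl_cons, List.foldl_nil, hgetA, hgetB, ne_eq, Option.some.injEq]
      rw [htrailp]
      by_cases hba : b = a
      · rw [if_neg (by simp [hba]), if_pos (by simp [hba])]
        simp only [List.length_append, List.length_cons, List.length_nil]
        push_cast; ring
      · rw [if_pos (by simp [Ne.symm hba]), if_neg (by simp [hba])]
        simp only [List.length_append, List.length_cons, List.length_nil]
        push_cast; ring

-- ===== VERDICT (by name: the statement is the Claim_ definition above) =====
theorem first_seen_spec : Claim_equal_first_seen := by
  intro p _
  unfold Spec_first_seen
  rw [first_seen_eq_trail, first_seen_alt_eq_trail]
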